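-- pv_equiv track=rewrite | github.com/jame9898/Netopo | Netopo-v1.0.0/dialogs/device_config_dialog.py | _get_mirror_n_shape_order
-- ===== SOURCE A (Python) =====
-- def _get_mirror_n_shape_order(count, rows=2):
--     order = []
--     cols = (count + rows - 1) // rows
--
--     for col in range(cols):
--         for row in range(rows):
--             idx = col * rows + row
--             if idx < count:
--                 order.append((idx, col, row))
--
--     return order
-- ===== SOURCE B (Python) =====
-- def _get_mirror_n_shape_order(count, rows=2):
--     # Single flat pass: idx // rows and idx % rows recover the (col, row)
--     # pair the nested loops would assign, and idx is already ascending.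
--     if rows <= 0:
--         return []
--     return [(idx, idx // rows, idx % rows) for idx in range(count)]
-- ===== Notes on version B (the rewrite author's own statement) =====
-- stated objective: simpler
-- what changed: Replaces the nested col/row loops (with the ceil-division cols bound and the idx<count guard) by one flat pass over range(count) that recovers col and row as idx//rows and idx%rows.
import Mathlib
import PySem

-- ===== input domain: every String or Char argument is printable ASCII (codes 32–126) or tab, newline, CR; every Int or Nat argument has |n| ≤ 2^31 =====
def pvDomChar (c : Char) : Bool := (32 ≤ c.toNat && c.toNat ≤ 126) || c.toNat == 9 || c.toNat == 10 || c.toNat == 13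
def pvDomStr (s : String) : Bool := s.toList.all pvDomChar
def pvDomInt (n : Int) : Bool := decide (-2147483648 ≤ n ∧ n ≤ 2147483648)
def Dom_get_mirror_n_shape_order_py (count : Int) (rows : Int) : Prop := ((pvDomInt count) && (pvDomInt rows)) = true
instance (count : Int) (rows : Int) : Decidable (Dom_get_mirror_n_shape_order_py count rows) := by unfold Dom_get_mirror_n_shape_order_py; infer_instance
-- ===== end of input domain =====

-- B replaces the nested col/row loops by one flat pass over range(count) using idx//rows, idx%rows (simpler).


-- ===== PORT A =====
def get_mirror_n_shape_order_py (count : Int) (rows : Int) : List (Int × Int × Int) :=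
  let cols := PySem.Int.floordiv (count + rows - 1) rows
  (PySem.List.pyRange 0 cols 1).foldl (fun order col =>
    (PySem.List.pyRange 0 rows 1).foldl (fun order row =>
      let idx := col * rows + row
      if idx < count then order ++ [(idx, col, row)] else order) order) []

-- ===== PORT B =====
def get_mirror_n_shape_order_py_alt (count : Int) (rows : Int) : List (Int × Int × Int) :=
  if rows ≤ 0 then []
  else (PySem.List.pyRange 0 count 1).map
    (fun idx => (idx, PySem.Int.floordiv idx rows, PySem.Int.mod idx rows))

-- ===== PRECONDITION & SPEC =====
-- Pre_ excludes exactly rows = 0, where A raises ZeroDivisionError on the ceil division.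
def Pre_get_mirror_n_shape_order_py (count : Int) (rows : Int) : Prop := rows ≠ 0
instance (count : Int) (rows : Int) : Decidable (Pre_get_mirror_n_shape_order_py count rows) := by unfold Pre_get_mirror_n_shape_order_py; infer_instance
def pvWitness_get_mirror_n_shape_order_py : Int × Int := (5, 2)

def Spec_get_mirror_n_shape_order_py (count : Int) (rows : Int) (out : List (Int × Int × Int)) : Prop := out = get_mirror_n_shape_order_py_alt count rows
instance (count : Int) (rows : Int) (out : List (Int × Int × Int)) : Decidable (Spec_get_mirror_n_shape_order_py count rows out) := by unfold Spec_get_mirror_n_shape_order_py; infer_instance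

-- ===== CLAIM (what is proved, stated in full; the proofs are below) =====
def Claim_equal_get_mirror_n_shape_order_py : Prop := ∀ (count : Int) (rows : Int), Dom_get_mirror_n_shape_order_py count rows → Pre_get_mirror_n_shape_order_py count rows → Spec_get_mirror_n_shape_order_py count rows (get_mirror_n_shape_order_py count rows)

-- ===== LEMMAS AND PROOFS =====

-- A column's worth of output: the inner row-loop emitted as a list.
def pvCol (count rows col : Int) : List (Int × Int × Int) :=
  ((PySem.List.pyRange 0 rows 1).filter (fun row => decide (col * rows + row < count))).map
    (fun row => (col * rows + row, col, row))

lemma pvA_flat (count rows : Int) :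
    get_mirror_n_shape_order_py count rows =
      (PySem.List.pyRange 0 (PySem.Int.floordiv (count + rows - 1) rows) 1).flatMap
        (pvCol count rows) := by
  unfold get_mirror_n_shape_order_py pvCol
  have inner : ∀ (col : Int) (acc : List (Int × Int × Int)),
      (PySem.List.pyRange 0 rows 1).foldl (fun order row =>
        if col * rows + row < count then order ++ [(col * rows + row, col, row)] else order) acc
      = acc ++ ((PySem.List.pyRange 0 rows 1).filter
          (fun row => decide (col * rows + row < count))).map
          (fun row => (col * rows + row, col, row)) := by
    intro col acc
    have h := PySem.List.foldl_append_if (fun row => decide (col * rows + row < count))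
      (fun row => (col * rows + row, col, row)) (PySem.List.pyRange 0 rows 1) acc
    simp only [decide_eq_true_eq] at h
    exact h
  simp only [inner, PySem.List.foldl_append_eq_flatMap, List.nil_append]

-- filter of range 0..rows by (· < d) is range 0..d, for 0 ≤ d ≤ rows
lemma pvFilter_range (rows d : Int) (h0 : 0 ≤ d) (h1 : d ≤ rows) :
    (PySem.List.pyRange 0 rows 1).filter (fun row => decide (row < d)) =
      PySem.List.pyRange 0 d 1 := by
  rw [PySem.List.pyRange_one_append 0 d rows h0 h1, List.filter_append]
  have e1 : (PySem.List.pyRange 0 d 1).filter (fun row => decide (row < d)) =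
      PySem.List.pyRange 0 d 1 := by
    apply List.filter_eq_self.2
    intro x hx
    have := (PySem.List.mem_pyRange_one).1 hx
    simp; omega
  have e2 : (PySem.List.pyRange d rows 1).filter (fun row => decide (row < d)) = [] := by
    apply List.filter_eq_nil_iff.2
    intro x hx
    have := (PySem.List.mem_pyRange_one).1 hx
    simp; omega
  rw [e1, e2, List.append_nil]

-- the key generalized invariant: c columns of A's output = B's flat list up to min count (c*rows)
lemma pvKey (count rows : Int) (hr : 0 < rows) (hc : 0 < count) :
    ∀ c : Nat,
      (PySem.List.pyRange 0 (c : Int) 1).flatMap (pvCol count rows) =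
        (PySem.List.pyRange 0 (min count ((c : Int) * rows)) 1).map
          (fun idx => (idx, PySem.Int.floordiv idx rows, PySem.Int.mod idx rows)) := by
  intro c
  induction c with
  | zero => simp [PySem.List.pyRange_one_eq_nil, hc.le]
  | succ n ih =>
    have hsucc : ((n + 1 : Nat) : Int) = (n : Int) + 1 := by push_cast; ring
    rw [hsucc, PySem.List.pyRange_one_succ_right (by positivity), List.flatMap_append, ih,
      List.flatMap_cons, List.flatMap_nil, List.append_nil]
    set N : Int := (n : Int) with hN
    have hNR : 0 ≤ N * rows := by positivity
    by_cases hle : count ≤ N * rows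
    · -- column n is entirely past count: both new parts are empty
      have hm : min count (N * rows) = count := by omega
      have hexp : (N + 1) * rows = N * rows + rows := by ring
      have hm' : min count ((N + 1) * rows) = count := by omega
      rw [hm, hm']
      have : pvCol count rows N = [] := by
        unfold pvCol
        have : (PySem.List.pyRange 0 rows 1).filter (fun row => decide (N * rows + row < count)) = [] := by
          apply List.filter_eq_nil_iff.2
          intro x hx
          have := (PySem.List.mem_pyRange_one).1 hx
          simp; omega
        rw [this]; rfl
      rw [this, List.append_nil]
    · -- column n starts before count: it contributes d = min (count - N*rows) rows entries
      push_neg at hle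
      set d : Int := min (count - N * rows) rows with hd
      have hexp : (N + 1) * rows = N * rows + rows := by ring
      have hd0 : 0 < d := by omega
      have hdr : d ≤ rows := by omega
      have hm : min count (N * rows) = N * rows := by omega
      have hm' : min count ((N + 1) * rows) = N * rows + d := by omega
      rw [hm, hm',
        PySem.List.pyRange_one_append 0 (N * rows) (N * rows + d) hNR (by omega),
        List.map_append]
      congr 1
      -- pvCol count rows N = map over pyRange (N*rows) (N*rows+d)
      unfold pvCol
      have hfe : (PySem.List.pyRange 0 rows 1).filter (fun row => decide (N * rows + row < count)) =
          (PySem.List.pyRange 0 rows 1).filter (fun row => decide (row < d)) := by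
        apply List.filter_congr
        intro x hx
        have := (PySem.List.mem_pyRange_one).1 hx
        simp; omega
      rw [hfe, pvFilter_range rows d hd0.le hdr]
      rw [PySem.List.pyRange_one (N * rows) (N * rows + d), PySem.List.pyRange_one 0 d]
      have he1 : N * rows + d - N * rows = d := by ring
      rw [he1]
      rw [List.map_map, List.map_map]
      simp only [Int.sub_zero, zero_add]
      apply List.map_congr_left
      intro k hk
      have hk' : (k : Int) < d := by
        have := List.mem_range.1 hk
        omega
      simp only [Function.comp]
      have hq : PySem.Int.floordiv (N * rows + (k : Int)) rows = N := by
        rw [PySem.Int.floordiv_eq_iff_of_pos hr]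
        constructor
        · nlinarith [Int.natCast_nonneg k]
        · nlinarith [Int.natCast_nonneg k]
      have hmod : PySem.Int.mod (N * rows + (k : Int)) rows = (k : Int) := by
        have := PySem.Int.floordiv_mul_add_mod (N * rows + (k : Int)) rows
        rw [hq] at this
        linarith
      rw [hq, hmod]

theorem get_mirror_n_shape_order_py_spec : Claim_equal_get_mirror_n_shape_order_py := by
  intro count rows _ hpre
  unfold Spec_get_mirror_n_shape_order_py
  unfold Pre_get_mirror_n_shape_order_py at hpre
  by_cases hr : rows ≤ 0
  · -- rows < 0: both sides are empty
    have hrneg : rows < 0 := lt_of_le_of_ne hr hpre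
    unfold get_mirror_n_shape_order_py get_mirror_n_shape_order_py_alt
    rw [if_pos hr]
    have hnil : PySem.List.pyRange 0 rows 1 = [] :=
      PySem.List.pyRange_one_eq_nil (by omega)
    simp [hnil]
  · push_neg at hr
    rw [pvA_flat]
    unfold get_mirror_n_shape_order_py_alt
    rw [if_neg (by omega)]
    set cols : Int := PySem.Int.floordiv (count + rows - 1) rows with hcols
    by_cases hc : count ≤ 0
    · -- empty result on both sides
      have hcolsle : cols ≤ 0 := by
        have := (PySem.Int.floordiv_eq_iff_of_pos hr (a := count + rows - 1) (q := cols)).1 hcols.symm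
        nlinarith [this.1, this.2]
      rw [PySem.List.pyRange_one_eq_nil hcolsle, PySem.List.pyRange_one_eq_nil (by omega)]
      rfl
    · push_neg at hc
      have hb := (PySem.Int.floordiv_eq_iff_of_pos hr (a := count + rows - 1) (q := cols)).1 hcols.symm
      have hcols0 : 0 < cols := by nlinarith [hb.1, hb.2]
      have hcount : min count (cols * rows) = count := by
        have h2 : count ≤ cols * rows := by nlinarith [hb.2]
        exact min_eq_left h2
      have hcast : ((cols.toNat : Int)) = cols := Int.toNat_of_nonneg hcols0.le
      rw [← hcast, pvKey count rows hr hc cols.toNat, hcast, hcount]
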